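-- pv_equiv track=rewrite | github.com/joydeepchatterjee730/DimenSys_AI | dimensys-explorer-main/backend/fusion/fusion.py | hierarchical_fusion
-- ===== SOURCE A (Python) =====
-- from typing import Any, Dict, List
--
-- def hierarchical_fusion(dimensions: List[Dict[str, Any]], agent_output: Dict[str, Any]) -> str:
--     """Hierarchical fusion with priority-based ordering."""
--     priority = ["risk", "sentiment", "intent", "semantic"]
--
--     sorted_dims = sorted(
--         dimensions,
--         key=lambda d: priority.index(d["name"]) if d["name"] in priority else 99
--     )
--
--     summary = []
--     for d in sorted_dims:
--         summary.append(f"{d['name']}: {d['label']}")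
--
--     agent_response = agent_output.get("response", "").strip()
--     if not agent_response:
--         agent_response = "No response generated."
--
--     return (
--         "Based on hierarchical reasoning:\n" +
--         "\n".join(summary) +
--         "\n\nFinal Response:\n" +
--         agent_response
--     )
-- ===== SOURCE B (Python) =====
-- def hierarchical_fusion(dimensions, agent_output):
--     """Hierarchical fusion: bucket placement instead of a comparison sort."""
--     priority = ["risk", "sentiment", "intent", "semantic"]
--
--     ordered = []
--     for name in priority:
--         for d in dimensions:
--             if d["name"] == name:
--                 ordered.append(d)
--     pset = set(priority)
--     for d in dimensions:
--         if d["name"] not in pset: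
--             ordered.append(d)
--
--     summary = "\n".join(f"{d['name']}: {d['label']}" for d in ordered)
--
--     agent_response = agent_output.get("response", "").strip() or "No response generated."
--
--     return (
--         "Based on hierarchical reasoning:\n" + summary +
--         "\n\nFinal Response:\n" + agent_response
--     )
-- ===== Notes on version B (the rewrite author's own statement) =====
-- stated objective: alternative
-- what changed: Replaces the sorted(..., key=priority.index) comparison sort with explicit bucket placement: one scan of dimensions per priority name in priority order, then one scan appending the non-priority dimensions, reproducing the stable order without sorting.
import Mathlib
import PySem

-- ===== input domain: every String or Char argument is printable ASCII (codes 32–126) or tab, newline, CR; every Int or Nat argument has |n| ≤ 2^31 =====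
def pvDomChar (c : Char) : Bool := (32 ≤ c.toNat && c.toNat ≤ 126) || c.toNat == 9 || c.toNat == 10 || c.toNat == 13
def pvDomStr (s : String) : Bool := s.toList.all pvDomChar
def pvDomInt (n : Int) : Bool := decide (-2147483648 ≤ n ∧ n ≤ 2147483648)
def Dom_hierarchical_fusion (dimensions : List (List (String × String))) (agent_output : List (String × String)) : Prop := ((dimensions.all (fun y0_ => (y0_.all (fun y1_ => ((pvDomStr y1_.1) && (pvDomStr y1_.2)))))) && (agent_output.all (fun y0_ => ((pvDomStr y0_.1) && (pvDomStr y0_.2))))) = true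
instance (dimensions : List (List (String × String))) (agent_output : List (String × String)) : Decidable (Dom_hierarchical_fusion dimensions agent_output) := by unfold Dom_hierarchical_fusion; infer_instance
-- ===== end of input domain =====

-- B replaces A's `sorted(..., key=priority.index)` by explicit bucket placement (one scan per
-- priority name, then the non-priority rest in original order) — an alternative, comparison-free
-- strategy of similar cost; return values agree on all inputs where A raises no KeyError.

-- ===== PORT A =====
-- the priority list both Pythons define locally
def pvPriority : List String := ["risk", "sentiment", "intent", "semantic"]

-- A's sort key: priority.index(d["name"]) if d["name"] in priority else 99
def pvKeyA (d : List (String × String)) : Int :=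
  if pvPriority.contains (PySem.Dict.getD (PySem.Dict.mk d) "name" "") then
    ((PySem.List.index? pvPriority (PySem.Dict.getD (PySem.Dict.mk d) "name" "")).getD 0 : Nat)
  else 99

def hierarchical_fusion (dimensions : List (List (String × String))) (agent_output : List (String × String)) : String :=
  let sorted_dims := PySem.List.sorted dimensions pvKeyA false
  let summary := sorted_dims.foldl (fun acc d =>
    acc ++ [PySem.Dict.getD (PySem.Dict.mk d) "name" "" ++ ": " ++ PySem.Dict.getD (PySem.Dict.mk d) "label" ""]) []
  let agent_response := PySem.Str.strip (PySem.Dict.getD (PySem.Dict.mk agent_output) "response" "")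
  let agent_response := if agent_response == "" then "No response generated." else agent_response
  "Based on hierarchical reasoning:\n" ++ PySem.Str.join "\n" summary ++
    "\n\nFinal Response:\n" ++ agent_response

-- ===== PORT B =====
def hierarchical_fusion_alt (dimensions : List (List (String × String))) (agent_output : List (String × String)) : String :=
  let ordered := pvPriority.foldl (fun acc name =>
    dimensions.foldl (fun acc2 d =>
      if PySem.Dict.getD (PySem.Dict.mk d) "name" "" == name then acc2 ++ [d] else acc2) acc) []
  let pset := PySem.Set.ofList pvPriority
  let ordered := dimensions.foldl (fun acc d =>
    if !(PySem.Set.contains pset (PySem.Dict.getD (PySem.Dict.mk d) "name" "")) then acc ++ [d] else acc) ordered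
  let summary := PySem.Str.join "\n" (ordered.map (fun d =>
    PySem.Dict.getD (PySem.Dict.mk d) "name" "" ++ ": " ++ PySem.Dict.getD (PySem.Dict.mk d) "label" ""))
  let agent_response := PySem.Str.strip (PySem.Dict.getD (PySem.Dict.mk agent_output) "response" "")
  let agent_response := if agent_response == "" then "No response generated." else agent_response
  "Based on hierarchical reasoning:\n" ++ summary ++ "\n\nFinal Response:\n" ++ agent_response

-- ===== PRECONDITION & SPEC =====
-- Pre_ excludes inputs where some dimension lacks key "name" or "label": there Python A (and B) raises KeyError.
def Pre_hierarchical_fusion (dimensions : List (List (String × String))) (agent_output : List (String × String)) : Prop :=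
  ∀ d ∈ dimensions, (PySem.Dict.get? (PySem.Dict.mk d) "name").isSome ∧ (PySem.Dict.get? (PySem.Dict.mk d) "label").isSome
instance (dimensions : List (List (String × String))) (agent_output : List (String × String)) : Decidable (Pre_hierarchical_fusion dimensions agent_output) := by unfold Pre_hierarchical_fusion; infer_instance

def pvWitness_hierarchical_fusion : (List (List (String × String))) × (List (String × String)) :=
  ([[("name", "risk"), ("label", "high")], [("name", "mood"), ("label", "calm")]], [("response", " ok ")])

def Spec_hierarchical_fusion (dimensions : List (List (String × String))) (agent_output : List (String × String)) (out : String) : Prop := out = hierarchical_fusion_alt dimensions agent_output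
instance (dimensions : List (List (String × String))) (agent_output : List (String × String)) (out : String) : Decidable (Spec_hierarchical_fusion dimensions agent_output out) := by unfold Spec_hierarchical_fusion; infer_instance

-- ===== CLAIM (what is proved, stated in full; the proofs are below) =====
def Claim_equal_hierarchical_fusion : Prop := ∀ (dimensions : List (List (String × String))) (agent_output : List (String × String)), Dom_hierarchical_fusion dimensions agent_output → Pre_hierarchical_fusion dimensions agent_output → Spec_hierarchical_fusion dimensions agent_output (hierarchical_fusion dimensions agent_output)

-- ===== LEMMAS AND PROOFS =====

-- the "name" field both ports read
def pvNm (d : List (String × String)) : String := PySem.Dict.getD (PySem.Dict.mk d) "name" ""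

-- A's key as a decision tree on the name
def pvKeyN (nm : String) : Int :=
  if nm == "risk" then 0 else if nm == "sentiment" then 1 else if nm == "intent" then 2
  else if nm == "semantic" then 3 else 99

lemma pvKeyA_eq (d : List (String × String)) : pvKeyA d = pvKeyN (pvNm d) := by
  unfold pvKeyA pvKeyN pvNm pvPriority
  generalize PySem.Dict.getD (PySem.Dict.mk d) "name" "" = nm
  by_cases h1 : nm = "risk"; · subst h1; decide
  by_cases h2 : nm = "sentiment"; · subst h2; decide
  by_cases h3 : nm = "intent"; · subst h3; decide
  by_cases h4 : nm = "semantic"; · subst h4; decide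
  simp [h1, h2, h3, h4]

-- insertBy skips a prefix none of whose elements x goes before
lemma pvInsertBy_append_skip {α : Type} (before : α → α → Bool) (x : α) (ys zs : List α)
    (h : ∀ y ∈ ys, before x y = false) :
    PySem.List.insertBy before x (ys ++ zs) = ys ++ PySem.List.insertBy before x zs := by
  induction ys with
  | nil => simp
  | cons y ys ih =>
    have hy : before x y = false := h y (by simp)
    show (if before x y then _ else _) = _
    simp only [hy, if_neg Bool.false_ne_true, List.cons_append]
    simpa using ih (fun y hy => h y (by simp [hy]))

-- insertBy puts x in front when it goes before every element
lemma pvInsertBy_front {α : Type} (before : α → α → Bool) (x : α) (zs : List α)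
    (h : ∀ y ∈ zs, before x y = true) :
    PySem.List.insertBy before x zs = x :: zs := by
  cases zs with
  | nil => rfl
  | cons y ys =>
    have hy : before x y = true := h y (by simp)
    show (if before x y then _ else _) = _
    simp [hy]

-- stable insertion sort = concatenation of key buckets, when the keys are covered
-- by a strictly increasing list ks
lemma pvSorted_buckets {α : Type} (key : α → Int) (ks : List Int) (hks : ks.Pairwise (· < ·)) :
    ∀ (xs : List α), (∀ x ∈ xs, key x ∈ ks) →
    PySem.List.sorted xs key false = (ks.map (fun k => xs.filter (fun x => key x == k))).flatten := by
  intro xs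
  induction xs using List.reverseRecOn with
  | nil => intro _; simp [PySem.List.sorted]
  | append_singleton xs x ih =>
    intro hcov
    have hxs : ∀ y ∈ xs, key y ∈ ks := fun y hy => hcov y (by simp [hy])
    have hx : key x ∈ ks := hcov x (by simp)
    rw [PySem.List.sorted_eq_foldl_insertBy, List.foldl_append]
    simp only [List.foldl_cons, List.foldl_nil]
    rw [← PySem.List.sorted_eq_foldl_insertBy, ih hxs]
    obtain ⟨s, t, rfl⟩ := List.append_of_mem hx
    have hps := hks
    rw [List.pairwise_append] at hps
    obtain ⟨_, hpt, hst⟩ := hps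
    rw [List.pairwise_cons] at hpt
    -- every bucket of s ++ [key x] contains only keys ≤ key x
    have hskip : ∀ y ∈ ((s.map (fun k => xs.filter (fun z => key z == k))).flatten
        ++ xs.filter (fun z => key z == key x)), decide (key x < key y) = false := by
      intro y hy
      rcases List.mem_append.mp hy with hy | hy
      · rw [List.mem_flatten] at hy
        obtain ⟨l, hl, hyl⟩ := hy
        rw [List.mem_map] at hl
        obtain ⟨k, hk, rfl⟩ := hl
        have := (List.mem_filter.mp hyl).2
        have hky : key y = k := by simpa using this
        have : k < key x := hst k hk (key x) (by simp)
        simp [hky]; omega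
      · have := (List.mem_filter.mp hy).2
        have hky : key y = key x := by simpa using this
        simp [hky]
    have hfront : ∀ y ∈ (t.map (fun k => xs.filter (fun z => key z == k))).flatten,
        decide (key x < key y) = true := by
      intro y hy
      rw [List.mem_flatten] at hy
      obtain ⟨l, hl, hyl⟩ := hy
      rw [List.mem_map] at hl
      obtain ⟨k, hk, rfl⟩ := hl
      have := (List.mem_filter.mp hyl).2
      have hky : key y = k := by simpa using this
      have : key x < k := hpt.1 k hk
      simp [hky]; omega
    -- rewrite the flatten over s ++ key x :: t
    rw [List.map_append, List.map_cons, List.flatten_append, List.flatten_cons]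
    rw [show (s.map (fun k => xs.filter (fun z => key z == k))).flatten
        ++ (xs.filter (fun z => key z == key x)
        ++ (t.map (fun k => xs.filter (fun z => key z == k))).flatten)
        = ((s.map (fun k => xs.filter (fun z => key z == k))).flatten
        ++ xs.filter (fun z => key z == key x))
        ++ (t.map (fun k => xs.filter (fun z => key z == k))).flatten by simp]
    rw [pvInsertBy_append_skip _ _ _ _ hskip, pvInsertBy_front _ _ _ hfront]
    -- now compute the buckets of xs ++ [x]
    have hbs : s.map (fun k => (xs ++ [x]).filter (fun z => key z == k))
        = s.map (fun k => xs.filter (fun z => key z == k)) := by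
      apply List.map_congr_left
      intro k hk
      have hne : key x ≠ k := by have := hst k hk (key x) (by simp); omega
      simp [List.filter_append, hne]
    have hbt : t.map (fun k => (xs ++ [x]).filter (fun z => key z == k))
        = t.map (fun k => xs.filter (fun z => key z == k)) := by
      apply List.map_congr_left
      intro k hk
      have hne : key x ≠ k := by have := hpt.1 k hk; omega
      simp [List.filter_append, hne]
    have hbk : (xs ++ [x]).filter (fun z => key z == key x)
        = xs.filter (fun z => key z == key x) ++ [x] := by
      simp [List.filter_append]
    rw [List.map_append, List.map_cons, List.flatten_append, List.flatten_cons, hbs, hbt, hbk]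
    simp

-- B's first double loop builds the four priority buckets
lemma pvOrderedB_buckets (dimensions : List (List (String × String))) :
    pvPriority.foldl (fun acc name =>
      dimensions.foldl (fun acc2 d =>
        if PySem.Dict.getD (PySem.Dict.mk d) "name" "" == name then acc2 ++ [d] else acc2) acc) []
    = (["risk", "sentiment", "intent", "semantic"].map
        (fun nm => dimensions.filter (fun d => pvNm d == nm))).flatten := by
  unfold pvPriority pvNm
  simp only [List.foldl_cons, List.foldl_nil, PySem.List.foldl_append_if_eq_filter,
    List.map_cons, List.map_nil, List.flatten_cons, List.flatten_nil]
  simp [List.append_assoc]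

-- bucket of key k ↔ bucket of the k-th name
lemma pvKeyN_filter (dimensions : List (List (String × String))) (nm : String) (k : Int)
    (h : ∀ s : String, (pvKeyN s == k) = (s == nm)) :
    dimensions.filter (fun d => pvKeyA d == k) = dimensions.filter (fun d => pvNm d == nm) := by
  apply List.filter_congr
  intro d _
  rw [pvKeyA_eq]; exact h (pvNm d)

-- the two programs build the same ordered list of dimensions
lemma pvOrdered_eq (dimensions : List (List (String × String))) :
    PySem.List.sorted dimensions pvKeyA false
    = dimensions.foldl (fun acc d =>
        if !(PySem.Set.contains (PySem.Set.ofList pvPriority) (PySem.Dict.getD (PySem.Dict.mk d) "name" "")) then acc ++ [d] else acc)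
      (pvPriority.foldl (fun acc name =>
        dimensions.foldl (fun acc2 d =>
          if PySem.Dict.getD (PySem.Dict.mk d) "name" "" == name then acc2 ++ [d] else acc2) acc) []) := by
  have hcov : ∀ d ∈ dimensions, pvKeyA d ∈ [(0 : Int), 1, 2, 3, 99] := by
    intro d _
    rw [pvKeyA_eq]
    unfold pvKeyN
    split_ifs <;> simp
  rw [pvSorted_buckets pvKeyA [0, 1, 2, 3, 99] (by decide) dimensions hcov]
  rw [pvOrderedB_buckets, PySem.List.foldl_append_if_eq_filter]
  have e0 := pvKeyN_filter dimensions "risk" 0 (by intro s; unfold pvKeyN; split_ifs with h1 h2 h3 h4 <;> simp_all)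
  have e1 := pvKeyN_filter dimensions "sentiment" 1 (by intro s; unfold pvKeyN; split_ifs with h1 h2 h3 h4 <;> simp_all)
  have e2 := pvKeyN_filter dimensions "intent" 2 (by intro s; unfold pvKeyN; split_ifs with h1 h2 h3 h4 <;> simp_all)
  have e3 := pvKeyN_filter dimensions "semantic" 3 (by intro s; unfold pvKeyN; split_ifs with h1 h2 h3 h4 <;> simp_all)
  have e99 : dimensions.filter (fun d => pvKeyA d == 99)
      = dimensions.filter (fun d => !(PySem.Set.contains (PySem.Set.ofList pvPriority) (PySem.Dict.getD (PySem.Dict.mk d) "name" ""))) := by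
    apply List.filter_congr
    intro d _
    rw [pvKeyA_eq]
    show (pvKeyN (pvNm d) == 99) = _
    rw [show PySem.Set.ofList pvPriority = pvPriority from rfl]
    unfold pvNm pvPriority PySem.Set.contains pvKeyN
    generalize PySem.Dict.getD (PySem.Dict.mk d) "name" "" = nm
    by_cases h1 : nm = "risk"; · subst h1; decide
    by_cases h2 : nm = "sentiment"; · subst h2; decide
    by_cases h3 : nm = "intent"; · subst h3; decide
    by_cases h4 : nm = "semantic"; · subst h4; decide
    simp [h1, h2, h3, h4]
  simp only [List.map_cons, List.map_nil, List.flatten_cons, List.flatten_nil] at *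
  rw [← e0, ← e1, ← e2, ← e3, ← e99]
  simp [List.append_assoc]

-- ===== VERDICT (by name: the statement is the Claim_ definition above) =====
theorem hierarchical_fusion_spec : Claim_equal_hierarchical_fusion := by
  intro dimensions agent_output _ _
  unfold Spec_hierarchical_fusion hierarchical_fusion hierarchical_fusion_alt
  simp only [PySem.List.foldl_append_singleton_eq_map, List.nil_append, pvOrdered_eq]
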